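-- pv_equiv track=rewrite | github.com/PRDG-k/heuristic | fcfs/fcfs_module.py | on_station_list
-- ===== SOURCE A (Python) =====
-- def on_station_list(schedules, nt):
--     T = set(range(1,nt + 1))
--
--     station_list = {}
--     for bus, sch in schedules.items():
--         _list = list(map(int, sch))
--         on = T - set(_list)
--
--         station_list[bus] = sorted(list(on))
--
--     return station_list
-- ===== SOURCE B (Python) =====
-- def on_station_list(schedules, nt):
--     station_list = {}
--     for bus, sch in schedules.items():
--         vals = sorted({v for v in map(int, sch) if 1 <= v <= nt})
--         res, prev = [], 0
--         for v in vals: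
--             res.extend(range(prev + 1, v))
--             prev = v
--         res.extend(range(prev + 1, nt + 1))
--         station_list[bus] = res
--     return station_list
-- ===== Notes on version B (the rewrite author's own statement) =====
-- stated objective: alternative
-- what changed: Instead of materialising the universe set, subtracting the schedule set and sorting the difference, B sorts the deduplicated in-range schedule values and emits the gap ranges between consecutive ones (plus the tail up to nt), so neither a universe container nor a per-universe-element membership test exists.
import Mathlib
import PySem

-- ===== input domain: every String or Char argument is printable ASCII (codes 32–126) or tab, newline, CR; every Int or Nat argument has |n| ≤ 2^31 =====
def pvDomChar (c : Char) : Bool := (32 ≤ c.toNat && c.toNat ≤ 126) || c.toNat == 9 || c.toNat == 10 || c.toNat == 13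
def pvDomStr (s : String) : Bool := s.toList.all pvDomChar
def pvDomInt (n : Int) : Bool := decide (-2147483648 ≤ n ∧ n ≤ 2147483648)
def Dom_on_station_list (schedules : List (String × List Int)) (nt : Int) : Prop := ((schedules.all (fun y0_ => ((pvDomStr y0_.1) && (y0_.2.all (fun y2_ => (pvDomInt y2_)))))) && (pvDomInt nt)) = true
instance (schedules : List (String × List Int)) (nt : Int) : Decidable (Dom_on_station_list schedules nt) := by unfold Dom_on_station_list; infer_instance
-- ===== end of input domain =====

-- B drops A's universe set, set difference and sort: it sorts the deduplicated in-range
-- schedule values and emits the gap ranges between consecutive ones; objective: alternative.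

-- ===== PORT A =====
def on_station_list (schedules : List (String × List Int)) (nt : Int) : List (String × List Int) :=
  let T : PySem.Set Int := PySem.Set.ofList (PySem.List.pyRange 1 (nt + 1) 1)
  let d := PySem.Dict.ofList schedules
  (d.items.foldl (fun station_list p =>
      let _list := p.2.map (fun v => v)          -- list(map(int, sch)) on ints
      let on := PySem.Set.diff T (PySem.Set.ofList _list)
      station_list.insert p.1 (PySem.List.sorted on (fun x => x) false))
    PySem.Dict.empty).items

-- ===== PORT B =====
def on_station_list_alt (schedules : List (String × List Int)) (nt : Int) : List (String × List Int) :=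
  ((PySem.Dict.ofList schedules).items.foldl (fun station_list p =>
      -- vals = sorted({v for v in map(int, sch) if 1 <= v <= nt})
      let vals := PySem.List.sorted
        (PySem.Set.ofList ((p.2.map (fun v => v)).filter (fun v => decide (1 ≤ v) && decide (v ≤ nt))))
        (fun x => x) false
      -- res, prev = [], 0; for v in vals: res.extend(range(prev+1, v)); prev = v
      let st := vals.foldl (fun (acc : List Int × Int) v =>
        (acc.1 ++ PySem.List.pyRange (acc.2 + 1) v 1, v)) ([], 0)
      -- res.extend(range(prev+1, nt+1))
      station_list.insert p.1 (st.1 ++ PySem.List.pyRange (st.2 + 1) (nt + 1) 1))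
    PySem.Dict.empty).items

-- ===== PRECONDITION & SPEC =====
def Spec_on_station_list (schedules : List (String × List Int)) (nt : Int) (out : List (String × List Int)) : Prop := out = on_station_list_alt schedules nt
instance (schedules : List (String × List Int)) (nt : Int) (out : List (String × List Int)) : Decidable (Spec_on_station_list schedules nt out) := by unfold Spec_on_station_list; infer_instance

-- ===== CLAIM (what is proved, stated in full; the proofs are below) =====
def Claim_equal_on_station_list : Prop := ∀ (schedules : List (String × List Int)) (nt : Int), Dom_on_station_list schedules nt → Spec_on_station_list schedules nt (on_station_list schedules nt)

-- ===== LEMMAS AND PROOFS =====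

-- the universe set(range(1, nt+1)) is just the range list (it has no duplicates)
theorem pv_T_eq (nt : Int) :
    PySem.Set.ofList (PySem.List.pyRange 1 (nt + 1) 1) = PySem.List.pyRange 1 (nt + 1) 1 :=
  PySem.Set.ofList_eq_self_of_nodup _ (PySem.List.nodup_pyRange_one 1 (nt + 1))

-- A's sorted(T - set(sch)) is the range filtered by non-membership (the filtered range is already increasing)
theorem pv_sorted_filter (nt : Int) (q : Int → Bool) :
    PySem.List.sorted ((PySem.List.pyRange 1 (nt + 1) 1).filter q) (fun x => x) false
      = (PySem.List.pyRange 1 (nt + 1) 1).filter q := by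
  apply PySem.List.sorted_eq_self_of_pairwise
  exact ((PySem.List.pairwise_lt_pyRange_one 1 (nt + 1)).filter q).imp (fun h => le_of_lt h)

-- B's gap walk over a strictly increasing list of values in (lo, nt] produces the filtered range
theorem pv_gaps (nt : Int) : ∀ (vals : List Int) (acc : List Int) (lo : Int),
    vals.Pairwise (· < ·) → (∀ v ∈ vals, lo < v ∧ v ≤ nt) →
    (vals.foldl (fun (acc : List Int × Int) v =>
        (acc.1 ++ PySem.List.pyRange (acc.2 + 1) v 1, v)) (acc, lo)).1
      ++ PySem.List.pyRange
          ((vals.foldl (fun (acc : List Int × Int) v =>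
              (acc.1 ++ PySem.List.pyRange (acc.2 + 1) v 1, v)) (acc, lo)).2 + 1) (nt + 1) 1
    = acc ++ (PySem.List.pyRange (lo + 1) (nt + 1) 1).filter (fun x => decide (x ∉ vals)) := by
  intro vals
  induction vals with
  | nil => intro acc lo _ _; simp
  | cons v vs ih =>
    intro acc lo hpw hbnd
    have hv : lo < v ∧ v ≤ nt := hbnd v (by simp)
    have hvs : ∀ w ∈ vs, v < w ∧ w ≤ nt := fun w hw =>
      ⟨(List.pairwise_cons.mp hpw).1 w hw, (hbnd w (by simp [hw])).2⟩
    simp only [List.foldl_cons]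
    rw [ih (acc ++ PySem.List.pyRange (lo + 1) v 1) v (List.pairwise_cons.mp hpw).2 hvs]
    rw [List.append_assoc]
    congr 1
    -- range(lo+1, nt+1) = range(lo+1, v) ++ [v] ++ range(v+1, nt+1)
    rw [PySem.List.pyRange_one_append (lo + 1) v (nt + 1) (by omega) (by omega),
        PySem.List.pyRange_one_append v (v + 1) (nt + 1) (by omega) (by omega),
        PySem.List.pyRange_one_singleton]
    simp only [List.filter_append]
    have h1 : (PySem.List.pyRange (lo + 1) v 1).filter (fun x => decide (x ∉ v :: vs))
        = PySem.List.pyRange (lo + 1) v 1 := by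
      apply List.filter_eq_self.mpr
      intro x hx
      have hxlt : x < v := (PySem.List.mem_pyRange_one.mp hx).2
      simp only [List.mem_cons, decide_eq_true_eq, not_or]
      refine ⟨by omega, fun hxvs => absurd (hvs x hxvs).1 (by omega)⟩
    have h2 : ([v] : List Int).filter (fun x => decide (x ∉ v :: vs)) = [] := by simp
    have h3 : (PySem.List.pyRange (v + 1) (nt + 1) 1).filter (fun x => decide (x ∉ v :: vs))
        = (PySem.List.pyRange (v + 1) (nt + 1) 1).filter (fun x => decide (x ∉ vs)) := by
      apply List.filter_congr
      intro x hx
      have hlt : v < x := (PySem.List.mem_pyRange_one.mp hx).1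
      have hne : x ≠ v := by omega
      simp [hne]
    rw [h1, h2, h3]
    simp

-- the two membership tests agree on the range: x in set(sch)  vs  x in vals
theorem pv_filter_congr (nt : Int) (sch : List Int) :
    (PySem.List.pyRange 1 (nt + 1) 1).filter
        (fun x => !(PySem.Set.contains (PySem.Set.ofList sch) x))
      = (PySem.List.pyRange 1 (nt + 1) 1).filter
          (fun x => decide (x ∉ PySem.List.sorted
            (PySem.Set.ofList (sch.filter (fun v => decide (1 ≤ v) && decide (v ≤ nt))))
            (fun x => x) false)) := by
  apply List.filter_congr
  intro x hx
  have hxr := PySem.List.mem_pyRange_one.mp hx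
  have hvmem : x ∈ PySem.List.sorted
      (PySem.Set.ofList (sch.filter (fun v => decide (1 ≤ v) && decide (v ≤ nt))))
      (fun x => x) false ↔ x ∈ sch := by
    rw [PySem.List.mem_sorted, PySem.Set.mem_ofList, List.mem_filter]
    exact ⟨fun h => h.1, fun h => ⟨h, by simp; omega⟩⟩
  by_cases h : x ∈ sch
  · have hc : PySem.Set.contains (PySem.Set.ofList sch) x = true :=
      (PySem.Set.contains_iff _ _).mpr ((PySem.Set.mem_ofList _ _).mpr h)
    simp [hvmem, h]
  · have hc : PySem.Set.contains (PySem.Set.ofList sch) x = false := by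
      cases hcb : PySem.Set.contains (PySem.Set.ofList sch) x
      · rfl
      · exact absurd ((PySem.Set.mem_ofList _ _).mp ((PySem.Set.contains_iff _ _).mp hcb)) h
    simp [hvmem, h]

-- per-bus: A's loop body value = B's loop body value
theorem pv_body (nt : Int) (sch : List Int) :
    PySem.List.sorted
        (PySem.Set.diff (PySem.Set.ofList (PySem.List.pyRange 1 (nt + 1) 1))
          (PySem.Set.ofList (sch.map (fun v => v)))) (fun x => x) false
      = (let vals := PySem.List.sorted
            (PySem.Set.ofList ((sch.map (fun v => v)).filter (fun v => decide (1 ≤ v) && decide (v ≤ nt))))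
            (fun x => x) false
         let st := vals.foldl (fun (acc : List Int × Int) v =>
            (acc.1 ++ PySem.List.pyRange (acc.2 + 1) v 1, v)) ([], 0)
         st.1 ++ PySem.List.pyRange (st.2 + 1) (nt + 1) 1) := by
  simp only [List.map_id']
  set vals := PySem.List.sorted
      (PySem.Set.ofList (sch.filter (fun v => decide (1 ≤ v) && decide (v ≤ nt))))
      (fun x => x) false with hvals
  have hpw : vals.Pairwise (· < ·) := PySem.List.sorted_ofList_pairwise_lt _
  have hbnd : ∀ v ∈ vals, (0 : Int) < v ∧ v ≤ nt := by
    intro v hv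
    rw [hvals, PySem.List.mem_sorted, PySem.Set.mem_ofList, List.mem_filter] at hv
    have := hv.2; simp at this; omega
  rw [pv_gaps nt vals [] 0 hpw hbnd, List.nil_append]
  rw [pv_T_eq]
  rw [show PySem.Set.diff (PySem.List.pyRange 1 (nt + 1) 1) (PySem.Set.ofList sch)
        = (PySem.List.pyRange 1 (nt + 1) 1).filter (fun x => !(PySem.Set.contains (PySem.Set.ofList sch) x)) from rfl]
  rw [pv_sorted_filter, pv_filter_congr, ← hvals]
  norm_num

-- ===== VERDICT (by name: the statement is the Claim_ definition above) =====
theorem on_station_list_spec : Claim_equal_on_station_list := by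
  intro schedules nt _
  unfold Spec_on_station_list on_station_list on_station_list_alt
  simp only
  have hnd : (List.map (fun p : String × List Int => p.1) (PySem.Dict.ofList schedules).items).Nodup := by
    have := PySem.Dict.nodup_keys_ofList (ps := schedules)
    simpa [PySem.Dict.keys] using this
  have hA := PySem.Dict.items_foldl_insert_fresh (PySem.Dict.ofList schedules).items
      (fun p : String × List Int => p.1)
      (fun p : String × List Int =>
        PySem.List.sorted
          (PySem.Set.diff (PySem.Set.ofList (PySem.List.pyRange 1 (nt + 1) 1))
            (PySem.Set.ofList (p.2.map (fun v => v)))) (fun x => x) false)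
      PySem.Dict.empty
      (fun a _ => by simp [PySem.Dict.contains_empty]) hnd
  have hB := PySem.Dict.items_foldl_insert_fresh (PySem.Dict.ofList schedules).items
      (fun p : String × List Int => p.1)
      (fun p : String × List Int =>
        let vals := PySem.List.sorted
          (PySem.Set.ofList ((p.2.map (fun v => v)).filter (fun v => decide (1 ≤ v) && decide (v ≤ nt))))
          (fun x => x) false
        let st := vals.foldl (fun (acc : List Int × Int) v =>
          (acc.1 ++ PySem.List.pyRange (acc.2 + 1) v 1, v)) ([], 0)
        st.1 ++ PySem.List.pyRange (st.2 + 1) (nt + 1) 1)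
      PySem.Dict.empty
      (fun a _ => by simp [PySem.Dict.contains_empty]) hnd
  beta_reduce at hA hB
  rw [hA, hB, show (PySem.Dict.empty : PySem.Dict String (List Int)).items = [] from rfl,
      List.nil_append, List.nil_append]
  apply List.map_congr_left
  intro p _
  exact congrArg (Prod.mk p.1) (pv_body nt p.2)
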